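-- pv_equiv track=rewrite | github.com/ORossLab/WGS_analysis | scripts/vacmap_analysis.py | remove_subset_groups
-- ===== SOURCE A (Python) =====
-- def remove_subset_groups(groups_dict):
--     keys_to_remove = set()
--     keys = list(groups_dict.keys())
--
--     # Compare each group with every other group
--     for i in range(len(keys)):
--         for j in range(len(keys)):
--             if i != j:
--                 # If group i is a subset of group j, mark it for removal
--                 if groups_dict[keys[i]].issubset(groups_dict[keys[j]]):
--                     keys_to_remove.add(keys[i])
--
--     # Remove the subset groups from the original dictionary
--     filtered_groups = {key: groups_dict[key] for key in groups_dict if key not in keys_to_remove}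
--
--     return filtered_groups
-- ===== SOURCE B (Python) =====
-- def _keep(groups_dict, index, n, k, v):
--     # keep (k, v) iff no OTHER entry's set is a superset of v
--     if not v:
--         return n < 2  # empty set is a subset of every other set
--     cands = index[min(v)]  # only sets containing min(v) can be supersets of v
--     return not any(k2 != k and v.issubset(groups_dict[k2]) for k2 in cands)
--
--
-- def remove_subset_groups(groups_dict):
--     # inverted index: element -> keys of the sets containing it
--     index = {}
--     for k, v in groups_dict.items():
--         for e in v:
--             index.setdefault(e, []).append(k)
--     n = len(groups_dict)
--     out = {}
--     for k, v in groups_dict.items():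
--         if _keep(groups_dict, index, n, k, v):
--             out[k] = v
--     return out
-- ===== Notes on version B (the rewrite author's own statement) =====
-- stated objective: faster
-- what changed: Replaces A's all-pairs nested index loops (every group subset-tested against every other group) by an inverted element-to-keys index: each group is subset-tested only against the groups that contain its minimum element, with the empty group handled by a length check.
import Mathlib
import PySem

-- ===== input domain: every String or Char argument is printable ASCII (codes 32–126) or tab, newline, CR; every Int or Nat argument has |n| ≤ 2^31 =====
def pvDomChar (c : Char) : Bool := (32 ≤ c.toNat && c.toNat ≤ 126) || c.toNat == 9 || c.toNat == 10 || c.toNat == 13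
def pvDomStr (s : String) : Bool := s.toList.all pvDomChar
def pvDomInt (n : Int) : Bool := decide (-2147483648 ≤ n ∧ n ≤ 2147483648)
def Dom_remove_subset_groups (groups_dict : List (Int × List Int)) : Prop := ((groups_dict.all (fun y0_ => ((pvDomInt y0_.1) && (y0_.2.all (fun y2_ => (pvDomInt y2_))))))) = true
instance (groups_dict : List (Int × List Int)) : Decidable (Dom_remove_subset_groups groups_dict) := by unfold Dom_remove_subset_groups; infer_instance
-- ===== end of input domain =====

-- B replaces A's all-pairs subset scan by an inverted element→keys index: each set is
-- checked only against the sets containing its minimum element (objective: faster, constant/typical-case mechanism).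


-- ===== PORT A =====
def remove_subset_groups (groups_dict : List (Int × List Int)) : List (Int × List Int) :=
  let d := PySem.Dict.mk groups_dict
  let keys := d.keys
  let n : Int := (keys.length : Int)
  let keys_to_remove : PySem.Set Int :=
    (PySem.List.pyRange 0 n 1).foldl (fun acc i =>
      (PySem.List.pyRange 0 n 1).foldl (fun acc j =>
        if i ≠ j then
          if PySem.Set.issubset (d.getD (PySem.List.pyGetD keys i 0) [])
                                (d.getD (PySem.List.pyGetD keys j 0) []) then
            PySem.Set.add acc (PySem.List.pyGetD keys i 0)
          else acc
        else acc) acc)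
      PySem.Set.empty
  keys.foldl (fun out key =>
    if PySem.Set.contains keys_to_remove key then out
    else out ++ [(key, d.getD key [])]) []

-- ===== PORT B =====
-- helper _keep of Source B
def pvKeep (groups_dict : List (Int × List Int)) (index : PySem.Dict Int (List Int))
    (n : Int) (k : Int) (v : List Int) : Bool :=
  match PySem.List.min? v (fun x => x) with
  | none => decide (n < 2)
  | some m =>
    let cands := index.getD m []
    !(cands.any (fun k2 => k2 != k &&
        PySem.Set.issubset v ((PySem.Dict.mk groups_dict).getD k2 [])))

def remove_subset_groups_alt (groups_dict : List (Int × List Int)) : List (Int × List Int) :=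
  let index : PySem.Dict Int (List Int) :=
    groups_dict.foldl (fun idx kv =>
      kv.2.foldl (fun idx e => idx.insert e (idx.getD e [] ++ [kv.1])) idx) PySem.Dict.empty
  let n : Int := (groups_dict.length : Int)
  groups_dict.foldl (fun out kv =>
    if pvKeep groups_dict index n kv.1 kv.2 then out ++ [kv] else out) []

-- ===== PRECONDITION & SPEC =====
-- Pre_ excludes association lists with duplicate keys: they do not encode a Python dict
-- (dict construction collapses duplicates), so no port over the list can be faithful there.
def Pre_remove_subset_groups (groups_dict : List (Int × List Int)) : Prop :=
  (groups_dict.map Prod.fst).Nodup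
instance (groups_dict : List (Int × List Int)) : Decidable (Pre_remove_subset_groups groups_dict) := by unfold Pre_remove_subset_groups; infer_instance
def pvWitness_remove_subset_groups : (List (Int × List Int)) := [(1, [1, 2]), (2, [5])]

def Spec_remove_subset_groups (groups_dict : List (Int × List Int)) (out : List (Int × List Int)) : Prop := out = remove_subset_groups_alt groups_dict
instance (groups_dict : List (Int × List Int)) (out : List (Int × List Int)) : Decidable (Spec_remove_subset_groups groups_dict out) := by unfold Spec_remove_subset_groups; infer_instance

-- ===== CLAIM (what is proved, stated in full; the proofs are below) =====
def Claim_equal_remove_subset_groups : Prop := ∀ (groups_dict : List (Int × List Int)), Dom_remove_subset_groups groups_dict → Pre_remove_subset_groups groups_dict → Spec_remove_subset_groups groups_dict (remove_subset_groups groups_dict)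

-- ===== LEMMAS AND PROOFS =====

-- the common spec: entry (k, v) has a strict "other" superset in gd
def pvHasSup (gd : List (Int × List Int)) (k : Int) (v : List Int) : Bool :=
  gd.any (fun kv2 => kv2.1 != k && PySem.Set.issubset v kv2.2)

-- generic: membership in a fold that only ever adds elements
theorem pv_mem_foldl_iff {α : Type} (L : List α) (step : List Int → α → List Int)
    (Q : α → Int → Prop)
    (h : ∀ acc i x, x ∈ step acc i ↔ x ∈ acc ∨ Q i x) :
    ∀ acc x, x ∈ L.foldl step acc ↔ x ∈ acc ∨ ∃ i ∈ L, Q i x := by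
  induction L with
  | nil => simp
  | cons a L ih =>
    intro acc x
    simp only [List.foldl_cons, ih, h, List.mem_cons]
    constructor
    · rintro ((h1 | h1) | ⟨i, hi, hq⟩)
      · exact Or.inl h1
      · exact Or.inr ⟨a, Or.inl rfl, h1⟩
      · exact Or.inr ⟨i, Or.inr hi, hq⟩
    · rintro (h1 | ⟨i, (rfl | hi), hq⟩)
      · exact Or.inl (Or.inl h1)
      · exact Or.inl (Or.inr hq)
      · exact Or.inr ⟨i, hi, hq⟩

-- membership in A's keys_to_remove set
theorem pv_mem_remset (d : PySem.Dict Int (List Int)) (keys : List Int) (n : Int) (x : Int) :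
    x ∈ ((PySem.List.pyRange 0 n 1).foldl (fun acc i =>
      (PySem.List.pyRange 0 n 1).foldl (fun acc j =>
        if i ≠ j then
          if PySem.Set.issubset (d.getD (PySem.List.pyGetD keys i 0) [])
                                (d.getD (PySem.List.pyGetD keys j 0) []) then
            PySem.Set.add acc (PySem.List.pyGetD keys i 0)
          else acc
        else acc) acc)
      PySem.Set.empty)
    ↔ ∃ i, (0 ≤ i ∧ i < n) ∧ ∃ j, (0 ≤ j ∧ j < n) ∧ i ≠ j ∧
        PySem.Set.issubset (d.getD (PySem.List.pyGetD keys i 0) [])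
                           (d.getD (PySem.List.pyGetD keys j 0) []) = true ∧
        x = PySem.List.pyGetD keys i 0 := by
  have hin : ∀ (i : Int) (acc : List Int) (j y : Int),
      y ∈ (if i ≠ j then
          if PySem.Set.issubset (d.getD (PySem.List.pyGetD keys i 0) [])
                                (d.getD (PySem.List.pyGetD keys j 0) []) then
            PySem.Set.add acc (PySem.List.pyGetD keys i 0)
          else acc
        else acc)
      ↔ y ∈ acc ∨ (i ≠ j ∧
        PySem.Set.issubset (d.getD (PySem.List.pyGetD keys i 0) [])
                           (d.getD (PySem.List.pyGetD keys j 0) []) = true ∧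
        y = PySem.List.pyGetD keys i 0) := by
    intro i acc j y
    split_ifs with h1 h2
    · rw [PySem.Set.mem_add]; tauto
    · tauto
    · tauto
  have hout : ∀ (acc : List Int) (i y : Int),
      y ∈ ((PySem.List.pyRange 0 n 1).foldl (fun acc j =>
        if i ≠ j then
          if PySem.Set.issubset (d.getD (PySem.List.pyGetD keys i 0) [])
                                (d.getD (PySem.List.pyGetD keys j 0) []) then
            PySem.Set.add acc (PySem.List.pyGetD keys i 0)
          else acc
        else acc) acc)
      ↔ y ∈ acc ∨ ∃ j, (0 ≤ j ∧ j < n) ∧ (i ≠ j ∧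
        PySem.Set.issubset (d.getD (PySem.List.pyGetD keys i 0) [])
                           (d.getD (PySem.List.pyGetD keys j 0) []) = true ∧
        y = PySem.List.pyGetD keys i 0) := by
    intro acc i y
    rw [pv_mem_foldl_iff _ _ _ (hin i) acc y]
    simp only [PySem.List.mem_pyRange_one]
  rw [pv_mem_foldl_iff _ _ _ hout PySem.Set.empty x]
  simp only [PySem.List.mem_pyRange_one, PySem.Set.empty, List.not_mem_nil, false_or]

-- membership in B's inverted index
theorem pv_mem_index (L : List (Int × List Int)) :
    ∀ (idx0 : PySem.Dict Int (List Int)) (e k2 : Int),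
      k2 ∈ (L.foldl (fun idx kv =>
        kv.2.foldl (fun idx e => idx.insert e (idx.getD e [] ++ [kv.1])) idx) idx0).getD e []
      ↔ k2 ∈ idx0.getD e [] ∨ ∃ kv ∈ L, kv.1 = k2 ∧ e ∈ kv.2 := by
  have inner : ∀ (v : List Int) (idx : PySem.Dict Int (List Int)) (k e k2 : Int),
      k2 ∈ (v.foldl (fun idx e => idx.insert e (idx.getD e [] ++ [k])) idx).getD e []
      ↔ k2 ∈ idx.getD e [] ∨ (k2 = k ∧ e ∈ v) := by
    intro v
    induction v with
    | nil => simp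
    | cons a v ih =>
      intro idx k e k2
      simp only [List.foldl_cons, ih, PySem.Dict.getD_insert, List.mem_cons]
      by_cases he : e = a
      · subst he
        simp [List.mem_append]
        try tauto
      · simp [he]
        try tauto
  induction L with
  | nil => simp
  | cons kv L ih =>
    intro idx0 e k2
    simp only [List.foldl_cons, ih, inner, List.mem_cons]
    constructor
    · rintro ((h | ⟨rfl, he⟩) | ⟨kv2, hm, hk, he⟩)
      · exact Or.inl h
      · exact Or.inr ⟨kv, Or.inl rfl, rfl, he⟩
      · exact Or.inr ⟨kv2, Or.inr hm, hk, he⟩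
    · rintro (h | ⟨kv2, (rfl | hm), hk, he⟩)
      · exact Or.inl (Or.inl h)
      · exact Or.inl (Or.inr ⟨hk.symm, he⟩)
      · exact Or.inr ⟨kv2, hm, hk, he⟩

-- lookups in the dict built from a nodup-key association list
theorem pv_getD_mk (gd : List (Int × List Int)) (hnd : (gd.map Prod.fst).Nodup)
    {k : Int} {v : List Int} (h : (k, v) ∈ gd) :
    (PySem.Dict.mk gd).getD k [] = v := by
  apply PySem.Dict.getD_of_mem_items (d := PySem.Dict.mk gd) h
  simpa [PySem.Dict.keys, PySem.Dict.items] using hnd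

-- generic: A's final loop is a filter-map
theorem pv_foldl_filter_map {α β : Type} (L : List α) (c : α → Bool) (g : α → β) :
    ∀ acc, L.foldl (fun out x => if c x then out else out ++ [g x]) acc
      = acc ++ (L.filter (fun x => !c x)).map g := by
  induction L with
  | nil => simp
  | cons a L ih =>
    intro acc
    by_cases h : c a <;> simp [h, ih]

-- in a nodup list of length ≥ 2 there is an element different from any given k
theorem pv_exists_ne_of_two {l : List Int} (hnd : l.Nodup) (hl : 2 ≤ l.length) (k : Int) :
    ∃ x ∈ l, x ≠ k := by
  match l, hnd, hl with
  | a :: b :: t, hnd, _ =>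
    have hab : a ≠ b := by simp [List.nodup_cons] at hnd; tauto
    by_cases ha : a = k
    · exact ⟨b, by simp, by subst ha; exact fun h => hab h.symm⟩
    · exact ⟨a, by simp, ha⟩

-- A's removal predicate coincides with pvHasSup on entries of gd
theorem pv_remset_iff (gd : List (Int × List Int)) (hnd : (gd.map Prod.fst).Nodup)
    {k : Int} {v : List Int} (h : (k, v) ∈ gd) :
    (∃ i, (0 ≤ i ∧ i < ((gd.map Prod.fst).length : Int)) ∧ ∃ j, (0 ≤ j ∧ j < ((gd.map Prod.fst).length : Int)) ∧ i ≠ j ∧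
        PySem.Set.issubset ((PySem.Dict.mk gd).getD (PySem.List.pyGetD (gd.map Prod.fst) i 0) [])
                           ((PySem.Dict.mk gd).getD (PySem.List.pyGetD (gd.map Prod.fst) j 0) []) = true ∧
        k = PySem.List.pyGetD (gd.map Prod.fst) i 0)
    ↔ pvHasSup gd k v = true := by
  have hget : ∀ (a : Nat) (ha : a < gd.length),
      PySem.List.pyGetD (gd.map Prod.fst) (a : Int) 0 = gd[a].1 := by
    intro a ha
    rw [PySem.List.pyGetD_natCast, List.getD_eq_getElem _ _ (by simpa using ha)]
    simp
  have hinj : ∀ (a b : Nat) (ha : a < gd.length) (hb : b < gd.length),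
      gd[a].1 = gd[b].1 → a = b := by
    intro a b ha hb hab
    have := (hnd.getElem_inj_iff (i := a) (hi := by simpa using ha)
      (j := b) (hj := by simpa using hb))
    simp only [List.getElem_map] at this
    exact this.mp hab
  constructor
  · rintro ⟨i, ⟨hi0, hin⟩, j, ⟨hj0, hjn⟩, hij, hsub, hk⟩
    simp only [List.length_map] at hin hjn
    have hia : ((i.toNat : Int)) = i := Int.toNat_of_nonneg hi0
    have hjb : ((j.toNat : Int)) = j := Int.toNat_of_nonneg hj0
    have ha : i.toNat < gd.length := by omega
    have hb : j.toNat < gd.length := by omega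
    rw [← hia, hget i.toNat ha] at hk hsub
    rw [← hjb, hget j.toNat hb] at hsub
    have hdk : (PySem.Dict.mk gd).getD k [] = v := pv_getD_mk gd hnd h
    have hmemb : (gd[j.toNat].1, gd[j.toNat].2) ∈ gd := by
      exact List.getElem_mem hb
    have hdb : (PySem.Dict.mk gd).getD (gd[j.toNat].1) [] = gd[j.toNat].2 :=
      pv_getD_mk gd hnd hmemb
    rw [← hk] at hsub
    rw [hdk, hdb] at hsub
    have hneq : gd[j.toNat].1 ≠ k := by
      intro he
      apply hij
      rw [← hia, ← hjb]
      congr 1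
      exact hinj i.toNat j.toNat ha hb (by rw [← hk]; exact he.symm)
    unfold pvHasSup
    rw [List.any_eq_true]
    refine ⟨gd[j.toNat], List.getElem_mem hb, ?_⟩
    simp [hneq, hsub]
  · intro hs
    unfold pvHasSup at hs
    rw [List.any_eq_true] at hs
    obtain ⟨kv2, hm2, hcond⟩ := hs
    rw [Bool.and_eq_true, bne_iff_ne] at hcond
    obtain ⟨hne, hsub⟩ := hcond
    obtain ⟨c, hc, hgc⟩ := List.getElem_of_mem h
    obtain ⟨b, hb, hgb⟩ := List.getElem_of_mem hm2
    refine ⟨(c : Int), ⟨by omega, by simp; omega⟩, (b : Int), ⟨by omega, by simp; omega⟩, ?_, ?_, ?_⟩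
    · intro he
      have : c = b := by omega
      subst this
      rw [hgc] at hgb
      rw [← hgb] at hne
      exact hne rfl
    · rw [hget c hc, hget b hb, hgc, hgb]
      have hdk : (PySem.Dict.mk gd).getD k [] = v := pv_getD_mk gd hnd h
      have hdb : (PySem.Dict.mk gd).getD kv2.1 [] = kv2.2 :=
        pv_getD_mk gd hnd (by simpa using hm2)
      rw [hdk, hdb]
      exact hsub
    · rw [hget c hc, hgc]

-- B's keep predicate is the negation of pvHasSup on entries of gd
theorem pv_keep_iff (gd : List (Int × List Int)) (hnd : (gd.map Prod.fst).Nodup)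
    {k : Int} {v : List Int} (h : (k, v) ∈ gd) :
    pvKeep gd (gd.foldl (fun idx kv =>
        kv.2.foldl (fun idx e => idx.insert e (idx.getD e [] ++ [kv.1])) idx) PySem.Dict.empty)
      (gd.length : Int) k v = !pvHasSup gd k v := by
  unfold pvKeep
  cases hmin : PySem.List.min? v (fun x => x) with
  | none =>
    have hv : v = [] := (PySem.List.min?_eq_none_iff v _).mp hmin
    subst hv
    have hsubnil : ∀ t : List Int, PySem.Set.issubset ([] : List Int) t = true :=
      fun t => (PySem.Set.issubset_iff _ _).mpr (by simp)
    by_cases hlen : gd.length < 2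
    · -- gd = [(k, [])]
      have : gd = [(k, [])] := by
        match gd, h, hlen with
        | [kv], h, _ => simp at h; simp [h]
      subst this
      simp [pvHasSup]
    · have h2 : 2 ≤ (gd.map Prod.fst).length := by simp; omega
      obtain ⟨x, hx, hxk⟩ := pv_exists_ne_of_two hnd h2 k
      rw [List.mem_map] at hx
      obtain ⟨kv2, hm2, rfl⟩ := hx
      have : pvHasSup gd k [] = true := by
        unfold pvHasSup
        rw [List.any_eq_true]
        exact ⟨kv2, hm2, by simp [hxk, hsubnil]⟩
      rw [this]
      simp
      omega
  | some m =>
    have hm : m ∈ v := PySem.List.min?_mem hmin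
    simp only []
    rw [Bool.not_inj_iff]
    rw [Bool.eq_iff_iff, List.any_eq_true]
    unfold pvHasSup
    rw [List.any_eq_true]
    constructor
    · rintro ⟨k2, hk2, hcond⟩
      rw [Bool.and_eq_true, bne_iff_ne] at hcond
      obtain ⟨hne, hsub⟩ := hcond
      rw [pv_mem_index gd PySem.Dict.empty m k2] at hk2
      rcases hk2 with hk2 | ⟨kv2, hm2, hk2, hmem⟩
      · simp [PySem.Dict.getD_empty] at hk2
      · have hd2 : (PySem.Dict.mk gd).getD k2 [] = kv2.2 := by
          rw [← hk2]
          exact pv_getD_mk gd hnd (by simpa using hm2)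
        rw [hd2] at hsub
        exact ⟨kv2, hm2, by simp [hk2, hne, hsub]⟩
    · rintro ⟨kv2, hm2, hcond⟩
      rw [Bool.and_eq_true, bne_iff_ne] at hcond
      obtain ⟨hne, hsub⟩ := hcond
      refine ⟨kv2.1, ?_, ?_⟩
      · rw [pv_mem_index gd PySem.Dict.empty m kv2.1]
        refine Or.inr ⟨kv2, hm2, rfl, ?_⟩
        exact (PySem.Set.issubset_iff _ _).mp hsub m hm
      · have hd2 : (PySem.Dict.mk gd).getD kv2.1 [] = kv2.2 :=
          pv_getD_mk gd hnd (by simpa using hm2)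
        simp [hne, hd2, hsub]

-- A's output fold is a filter of gd, given the per-entry facts
theorem pv_filter_map_fst (L : List (Int × List Int)) (c : Int → Bool)
    (g : Int → (Int × List Int)) (q : (Int × List Int) → Bool)
    (hc : ∀ kv ∈ L, c kv.1 = !q kv) (hg : ∀ kv ∈ L, g kv.1 = kv) :
    ((L.map Prod.fst).filter (fun x => !c x)).map g = L.filter q := by
  induction L with
  | nil => simp
  | cons kv L ih =>
    have hck : (!c kv.1) = q kv := by rw [hc kv (by simp)]; simp
    have ih' := ih (fun kv h => hc kv (List.mem_cons_of_mem _ h))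
      (fun kv h => hg kv (List.mem_cons_of_mem _ h))
    cases hq : q kv with
    | true =>
      have h1 : (!c kv.1) = true := by rw [hck, hq]
      simp [h1, hq, ih', hg kv (by simp)]
    | false =>
      have h1 : (!c kv.1) = false := by rw [hck, hq]
      simp [h1, hq, ih']

-- ===== VERDICT (by name: the statement is the Claim_ definition above) =====
theorem remove_subset_groups_spec : Claim_equal_remove_subset_groups := by
  intro gd _ hnd
  unfold Spec_remove_subset_groups
  have hkeys : (PySem.Dict.mk gd).keys = gd.map Prod.fst := by
    simp [PySem.Dict.keys]
  simp only [remove_subset_groups, remove_subset_groups_alt, hkeys]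
  rw [pv_foldl_filter_map]
  rw [PySem.List.foldl_append_if]
  simp only [List.nil_append, List.map_id']
  apply pv_filter_map_fst
  · intro kv hkv
    have hmem : (kv.1, kv.2) ∈ gd := by simpa using hkv
    rw [pv_keep_iff gd hnd hmem]
    rw [Bool.eq_iff_iff]
    simp only [Bool.not_not]
    have hiff := (pv_mem_remset (PySem.Dict.mk gd) (gd.map Prod.fst)
      ((gd.map Prod.fst).length : Int) kv.1).trans (pv_remset_iff gd hnd hmem)
    rw [← hiff]
    simp [PySem.Set.contains]
  · intro kv hkv
    have hmem : (kv.1, kv.2) ∈ gd := by simpa using hkv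
    have := pv_getD_mk gd hnd hmem
    rw [this]
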